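-- pv_equiv track=rewrite | github.com/maq1017/VersaTerm | software/tools/render_viewdata_mosaic.py | make_half_glyph
-- ===== SOURCE A (Python) =====
-- ROW_SPANS = [
--     (0,  7),   # top    block
--     (7,  14),  # middle block
--     (14, 20),  # bottom block
-- ]
--
-- LEFT_CONT = 0xFF
--
-- LEFT_SEP  = 0x7E
--
-- def make_half_glyph(pattern, side, separated=False):
--     """Return list of CHAR_HEIGHT bytes for the LEFT or RIGHT half of pattern."""
--     if side == 'left':
--         on_bits = [bool(pattern & 0x01), bool(pattern & 0x04), bool(pattern & 0x10)]
--     else: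
--         on_bits = [bool(pattern & 0x02), bool(pattern & 0x08), bool(pattern & 0x20)]
--     fill = LEFT_SEP if separated else LEFT_CONT
--     rows = []
--     for row_idx, (rs, re) in enumerate(ROW_SPANS):
--         rows.extend([fill if on_bits[row_idx] else 0] * (re - rs))
--     return rows
-- ===== SOURCE B (Python) =====
-- def make_half_glyph(pattern, side, separated=False):
--     """Return list of CHAR_HEIGHT bytes for the LEFT or RIGHT half of pattern."""
--     shift = 0 if side == 'left' else 1
--     fill = 0x7E if separated else 0xFF
--     return [fill * (pattern // 2 ** (shift + 2 * ((i >= 7) + (i >= 14))) % 2)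
--             for i in range(20)]
-- ===== Notes on version B (the rewrite author's own statement) =====
-- stated objective: alternative
-- what changed: Replaces the boolean on_bits list and the span-wise extend over ROW_SPANS with a single arithmetic pass over the 20 row indices: each row classifies itself into its block and extracts the corresponding pattern bit by floor-division and mod, multiplying it into the fill byte (no intermediate boolean list, no spans).
import Mathlib
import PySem

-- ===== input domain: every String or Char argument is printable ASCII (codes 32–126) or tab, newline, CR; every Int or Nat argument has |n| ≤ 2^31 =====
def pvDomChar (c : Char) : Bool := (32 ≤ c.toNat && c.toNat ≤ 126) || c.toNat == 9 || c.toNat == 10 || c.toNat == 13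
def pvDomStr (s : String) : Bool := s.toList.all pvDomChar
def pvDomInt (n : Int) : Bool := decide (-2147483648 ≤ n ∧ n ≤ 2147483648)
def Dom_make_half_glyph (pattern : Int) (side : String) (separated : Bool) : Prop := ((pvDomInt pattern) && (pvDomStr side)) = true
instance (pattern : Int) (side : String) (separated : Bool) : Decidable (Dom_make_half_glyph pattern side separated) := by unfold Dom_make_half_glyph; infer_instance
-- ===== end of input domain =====

-- B drops the boolean on_bits list and the span-wise extend over ROW_SPANS: one arithmetic
-- pass over the 20 row indices, each row extracting its block's pattern bit by floordiv/mod
-- and multiplying it into the fill byte (alternative decomposition, same cost).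
-- ===== PORT A =====
def ROW_SPANS : List (Int × Int) := [(0, 7), (7, 14), (14, 20)]

def LEFT_CONT : Int := 0xFF
def LEFT_SEP : Int := 0x7E

def make_half_glyph (pattern : Int) (side : String) (separated : Bool) : List Int :=
  let on_bits : List Bool :=
    if side = "left" then
      [decide (PySem.Int.band pattern 0x01 ≠ 0), decide (PySem.Int.band pattern 0x04 ≠ 0), decide (PySem.Int.band pattern 0x10 ≠ 0)]
    else
      [decide (PySem.Int.band pattern 0x02 ≠ 0), decide (PySem.Int.band pattern 0x08 ≠ 0), decide (PySem.Int.band pattern 0x20 ≠ 0)]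
  let fill : Int := if separated then LEFT_SEP else LEFT_CONT
  (PySem.List.enumerate ROW_SPANS).foldl
    (fun rows p =>
      rows ++ List.replicate (p.2.2 - p.2.1).toNat (if PySem.List.pyGetD on_bits p.1 false then fill else 0))
    []

-- ===== PORT B =====
def make_half_glyph_alt (pattern : Int) (side : String) (separated : Bool) : List Int :=
  let shift : Nat := if side = "left" then 0 else 1
  let fill : Int := if separated then 0x7E else 0xFF
  (PySem.List.pyRange 0 20 1).map fun i =>
    fill * PySem.Int.mod
      (PySem.Int.floordiv pattern
        ((2 : Int) ^ (shift + 2 * ((if (7:Int) ≤ i then 1 else 0) + (if (14:Int) ≤ i then 1 else 0)))))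
      2

-- ===== PRECONDITION & SPEC =====
def Spec_make_half_glyph (pattern : Int) (side : String) (separated : Bool) (out : List Int) : Prop := out = make_half_glyph_alt pattern side separated
instance (pattern : Int) (side : String) (separated : Bool) (out : List Int) : Decidable (Spec_make_half_glyph pattern side separated out) := by unfold Spec_make_half_glyph; infer_instance

-- ===== CLAIM (what is proved, stated in full; the proofs are below) =====
def Claim_equal_make_half_glyph : Prop := ∀ (pattern : Int) (side : String) (separated : Bool), Dom_make_half_glyph pattern side separated → Spec_make_half_glyph pattern side separated (make_half_glyph pattern side separated)

-- ===== LEMMAS AND PROOFS =====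

-- floor division of -(n+1) by a positive m
theorem neg_ediv_aux (n m : ℕ) (h : 0 < m) : (-(n:Int) - 1) / (m:Int) = -((n / m : ℕ):Int) - 1 := by
  have h' : (0:Int) < m := by exact_mod_cast h
  have key := (Int.ediv_emod_unique (a := -(n:Int) - 1) (b := m)
      (q := -((n / m : ℕ):Int) - 1) (r := (m:Int) - 1 - ((n % m : ℕ):Int)) h')
  have hd : ((m:Int)) * ((n/m:ℕ):Int) + ((n%m:ℕ):Int) = (n:Int) := by
    exact_mod_cast congrArg (Nat.cast : ℕ → ℤ) (Nat.div_add_mod n m)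
  have hmlt : ((n % m : ℕ):Int) < m := by exact_mod_cast Nat.mod_lt n h
  exact ((key.mpr ⟨by nlinarith, by omega, by omega⟩).1)

-- the bit-k indicator of a Python int, extracted arithmetically, equals the band test
theorem bit_arith (a : Int) (k : Nat) :
    PySem.Int.mod (PySem.Int.floordiv a ((2:Int)^k)) 2
      = if PySem.Int.band a ((2:Int)^k) ≠ 0 then 1 else 0 := by
  have hm : (0:Int) < (2:Int)^k := by positivity
  have hmn : 0 < 2^k := Nat.two_pow_pos k
  have hcast : ((2:Int)^k) = ((2^k : ℕ) : Int) := by push_cast; ring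
  rw [PySem.Int.floordiv_eq_ediv_of_pos hm,
      PySem.Int.mod_eq_emod_of_pos (by norm_num : (0:Int) < 2)]
  by_cases ha : 0 ≤ a
  · obtain ⟨n, rfl⟩ := Int.eq_ofNat_of_zero_le ha
    have hband : PySem.Int.band (n:Int) ((2:Int)^k)
        = (((Nat.testBit n k).toNat * 2^k : ℕ) : Int) := by
      rw [hcast, PySem.Int.band_natCast, Nat.and_two_pow]
    rw [hband, hcast, ← Int.natCast_ediv]
    cases hb : Nat.testBit n k <;>
      (have hp := hb; rw [Nat.testBit_eq_decide_div_mod_eq] at hp; simp at hp)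
    · rw [show ((Bool.toNat false * 2^k : ℕ):Int) = 0 by simp, if_neg (by simp)]; omega
    · rw [show ((Bool.toNat true * 2^k : ℕ):Int) = ((2^k:ℕ):Int) by simp,
          if_pos (Nat.cast_ne_zero.mpr hmn.ne')]; omega
  · push Not at ha
    obtain ⟨n, rfl⟩ : ∃ n : ℕ, a = -(n:Int) - 1 := ⟨(-a-1).toNat, by omega⟩
    have htn : ((2:Int)^k).toNat = 2^k := by rw [hcast]; exact Int.toNat_natCast _
    have hband : PySem.Int.band (-(n:Int) - 1) ((2:Int)^k)
        = ((2^k - (Nat.testBit n k).toNat * 2^k : ℕ) : Int) := by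
      unfold PySem.Int.band
      rw [if_neg (by omega), if_pos (le_of_lt hm)]
      have h2 : (-(-(n:Int) - 1) - 1).toNat = n := by omega
      rw [htn, h2, Nat.and_comm, Nat.and_two_pow]
    rw [hband, hcast, neg_ediv_aux n (2^k) hmn]
    cases hb : Nat.testBit n k <;>
      (have hp := hb; rw [Nat.testBit_eq_decide_div_mod_eq] at hp; simp at hp)
    · rw [show ((2^k - Bool.toNat false * 2^k : ℕ):Int) = ((2^k:ℕ):Int) by simp,
          if_pos (Nat.cast_ne_zero.mpr hmn.ne')]; omega
    · rw [show ((2^k - Bool.toNat true * 2^k : ℕ):Int) = 0 by simp, if_neg (by simp)]; omega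

-- one output cell: fill times the arithmetic bit = the if-then-else A computes
theorem cell (a fill : Int) (k : Nat) :
    fill * PySem.Int.mod (PySem.Int.floordiv a ((2:Int)^k)) 2
      = if PySem.Int.band a ((2:Int)^k) ≠ 0 then fill else 0 := by
  rw [bit_arith]; split_ifs <;> ring

theorem cellE (a fill m : Int) (k : Nat) (hm : m = (2:Int)^k) :
    (if PySem.Int.band a m = 0 then (0:Int) else fill) = fill * (a / m % 2) := by
  subst hm
  have h := cell a fill k
  rw [PySem.Int.floordiv_eq_ediv_of_pos (by positivity),
      PySem.Int.mod_eq_emod_of_pos (by norm_num : (0:Int) < 2)] at h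
  rw [h]; by_cases hb : PySem.Int.band a ((2:Int)^k) = 0 <;> simp [hb]

theorem cellE1 (a fill : Int) : (if PySem.Int.band a 1 = 0 then (0:Int) else fill) = fill * (a % 2) := by
  simpa using cellE a fill 1 0 (by norm_num)
theorem cellE2 (a fill : Int) : (if PySem.Int.band a 2 = 0 then (0:Int) else fill) = fill * (a / 2 % 2) := by
  simpa using cellE a fill 2 1 (by norm_num)
theorem cellE4 (a fill : Int) : (if PySem.Int.band a 4 = 0 then (0:Int) else fill) = fill * (a / 4 % 2) := by
  simpa using cellE a fill 4 2 (by norm_num)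
theorem cellE8 (a fill : Int) : (if PySem.Int.band a 8 = 0 then (0:Int) else fill) = fill * (a / 8 % 2) := by
  simpa using cellE a fill 8 3 (by norm_num)
theorem cellE16 (a fill : Int) : (if PySem.Int.band a 16 = 0 then (0:Int) else fill) = fill * (a / 16 % 2) := by
  simpa using cellE a fill 16 4 (by norm_num)
theorem cellE32 (a fill : Int) : (if PySem.Int.band a 32 = 0 then (0:Int) else fill) = fill * (a / 32 % 2) := by
  simpa using cellE a fill 32 5 (by norm_num)

theorem pyRange20 : PySem.List.pyRange 0 20 1
    = [0,1,2,3,4,5,6,7,8,9,10,11,12,13,14,15,16,17,18,19] := by decide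

-- the span fold of A, for arbitrary bit masks in on_bits, written out
theorem keyA (b0 b1 b2 : Bool) (fill : Int) :
    (PySem.List.enumerate ROW_SPANS).foldl
      (fun rows p =>
        rows ++ List.replicate (p.2.2 - p.2.1).toNat
          (if (PySem.List.pyGetD [b0, b1, b2] p.1 false) then fill else 0))
      [] =
    List.replicate 7 (if b0 then fill else 0) ++ List.replicate 7 (if b1 then fill else 0)
      ++ List.replicate 6 (if b2 then fill else 0) := by
  cases b0 <;> cases b1 <;> cases b2 <;> rfl

-- ===== VERDICT (by name: the statement is the Claim_ definition above) =====
theorem make_half_glyph_spec : Claim_equal_make_half_glyph := by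
  intro pattern side separated _
  unfold Spec_make_half_glyph make_half_glyph make_half_glyph_alt LEFT_SEP LEFT_CONT
  by_cases hs : side = "left" <;> cases separated <;>
    simp only [hs, if_pos, if_neg, not_false_iff] <;>
    rw [keyA, pyRange20] <;>
    norm_num [List.replicate, cellE1, cellE2, cellE4, cellE8, cellE16, cellE32]
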